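-- pv_equiv track=rewrite | github.com/AlexNoske/PolyFind | PolyFind.py | polyEdge4
-- ===== SOURCE A (Python) =====
-- def polyEdge4(noNodesG1,noNodesG2):
--     constraints=[]
--     constraint="cnf(sml,axiom,t(Y,Y,X,X)=X"
--     if (noNodesG2<noNodesG1):
--         for i in range(noNodesG2,noNodesG1):
--             constraint = constraint + "|X=" + str(i)
--     elif (noNodesG1<noNodesG2):
--         for i in range(noNodesG1,noNodesG2):
--             constraint = constraint + "|X=" + str(i)
--     constraint = constraint + ").\n"
--     constraints.append(constraint)
--     constraint="cnf(sml,axiom,t(Y,X,Y,X)=X"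
--     if (noNodesG2<noNodesG1):
--         for i in range(noNodesG2,noNodesG1):
--             constraint = constraint + "|X=" + str(i)
--     elif (noNodesG1<noNodesG2):
--         for i in range(noNodesG1,noNodesG2):
--             constraint = constraint + "|X=" + str(i)
--     constraint = constraint + ").\n"
--     constraints.append(constraint)
--     constraint="cnf(sml,axiom,t(X,X,X,Y)=X"
--     if (noNodesG2<noNodesG1):
--         for i in range(noNodesG2,noNodesG1):
--             constraint = constraint + "|X=" + str(i)
--     elif (noNodesG1<noNodesG2):
--         for i in range(noNodesG1,noNodesG2):
--             constraint = constraint + "|X=" + str(i)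
--     constraint = constraint + ").\n"
--     constraints.append(constraint)
--     return constraints
-- ===== SOURCE B (Python) =====
-- def polyEdge4(noNodesG1, noNodesG2):
--     suffix = ''.join('|X=' + str(i) for i in range(min(noNodesG1, noNodesG2), max(noNodesG1, noNodesG2)))
--     prefixes = ["cnf(sml,axiom,t(Y,Y,X,X)=X",
--                 "cnf(sml,axiom,t(Y,X,Y,X)=X",
--                 "cnf(sml,axiom,t(X,X,X,Y)=X"]
--     return [p + suffix + ").\n" for p in prefixes]
-- ===== Notes on version B (the rewrite author's own statement) =====
-- stated objective: faster
-- what changed: Builds the shared '|X=i' suffix once with str.join over range(min,max) and maps three fixed prefixes over it, instead of A's three repeated branch-and-loop blocks that grow each string by repeated concatenation.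
import Mathlib
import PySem

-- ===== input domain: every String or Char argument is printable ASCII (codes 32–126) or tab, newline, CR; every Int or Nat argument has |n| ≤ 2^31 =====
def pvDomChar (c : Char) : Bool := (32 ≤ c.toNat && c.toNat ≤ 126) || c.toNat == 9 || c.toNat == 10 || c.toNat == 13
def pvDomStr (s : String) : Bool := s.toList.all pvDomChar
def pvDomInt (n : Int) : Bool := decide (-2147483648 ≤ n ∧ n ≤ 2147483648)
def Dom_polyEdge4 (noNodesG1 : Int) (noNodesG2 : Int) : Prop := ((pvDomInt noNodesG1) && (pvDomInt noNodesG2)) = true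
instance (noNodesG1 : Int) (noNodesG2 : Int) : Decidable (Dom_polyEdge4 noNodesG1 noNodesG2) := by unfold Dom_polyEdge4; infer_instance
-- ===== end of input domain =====

-- B builds the shared "|X=i" suffix once over range(min,max) and maps three fixed
-- prefixes over it, instead of A's three repeated branch-and-loop blocks (simpler).


-- ===== PORT A =====
def polyEdge4 (noNodesG1 : Int) (noNodesG2 : Int) : List String :=
  let constraints : List String := []
  let constraint := "cnf(sml,axiom,t(Y,Y,X,X)=X"
  let constraint :=
    if noNodesG2 < noNodesG1 then
      (PySem.List.pyRange noNodesG2 noNodesG1 1).foldl (fun s i => s ++ "|X=" ++ PySem.Int.toStr i) constraint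
    else if noNodesG1 < noNodesG2 then
      (PySem.List.pyRange noNodesG1 noNodesG2 1).foldl (fun s i => s ++ "|X=" ++ PySem.Int.toStr i) constraint
    else constraint
  let constraint := constraint ++ ").\n"
  let constraints := constraints ++ [constraint]
  let constraint := "cnf(sml,axiom,t(Y,X,Y,X)=X"
  let constraint :=
    if noNodesG2 < noNodesG1 then
      (PySem.List.pyRange noNodesG2 noNodesG1 1).foldl (fun s i => s ++ "|X=" ++ PySem.Int.toStr i) constraint
    else if noNodesG1 < noNodesG2 then
      (PySem.List.pyRange noNodesG1 noNodesG2 1).foldl (fun s i => s ++ "|X=" ++ PySem.Int.toStr i) constraint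
    else constraint
  let constraint := constraint ++ ").\n"
  let constraints := constraints ++ [constraint]
  let constraint := "cnf(sml,axiom,t(X,X,X,Y)=X"
  let constraint :=
    if noNodesG2 < noNodesG1 then
      (PySem.List.pyRange noNodesG2 noNodesG1 1).foldl (fun s i => s ++ "|X=" ++ PySem.Int.toStr i) constraint
    else if noNodesG1 < noNodesG2 then
      (PySem.List.pyRange noNodesG1 noNodesG2 1).foldl (fun s i => s ++ "|X=" ++ PySem.Int.toStr i) constraint
    else constraint
  let constraint := constraint ++ ").\n"
  let constraints := constraints ++ [constraint]
  constraints

-- ===== PORT B =====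
def polyEdge4_alt (noNodesG1 : Int) (noNodesG2 : Int) : List String :=
  let suffix := String.join
    (((PySem.List.pyRange (min noNodesG1 noNodesG2) (max noNodesG1 noNodesG2) 1).map
      (fun i => "|X=" ++ PySem.Int.toStr i)))
  let prefixes := ["cnf(sml,axiom,t(Y,Y,X,X)=X",
                   "cnf(sml,axiom,t(Y,X,Y,X)=X",
                   "cnf(sml,axiom,t(X,X,X,Y)=X"]
  prefixes.map (fun p => p ++ suffix ++ ").\n")

-- ===== PRECONDITION & SPEC =====
def Spec_polyEdge4 (noNodesG1 : Int) (noNodesG2 : Int) (out : List String) : Prop := out = polyEdge4_alt noNodesG1 noNodesG2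
instance (noNodesG1 : Int) (noNodesG2 : Int) (out : List String) : Decidable (Spec_polyEdge4 noNodesG1 noNodesG2 out) := by unfold Spec_polyEdge4; infer_instance

-- ===== CLAIM (what is proved, stated in full; the proofs are below) =====
def Claim_equal_polyEdge4 : Prop := ∀ (noNodesG1 : Int) (noNodesG2 : Int), Dom_polyEdge4 noNodesG1 noNodesG2 → Spec_polyEdge4 noNodesG1 noNodesG2 (polyEdge4 noNodesG1 noNodesG2)

-- ===== LEMMAS AND PROOFS =====

-- pulling the start string out of a string-append fold
theorem foldl_app_str (l : List String) (p : String) :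
    l.foldl (fun r s => r ++ s) p = p ++ l.foldl (fun r s => r ++ s) "" := by
  induction l generalizing p with
  | nil => simp
  | cons a t ih =>
      rw [List.foldl_cons, List.foldl_cons, ih (p ++ a), ih ("" ++ a), String.append_assoc]
      simp

-- accumulating fold with appends equals prefix ++ joined mapped pieces
theorem foldl_join (g : Int → String) (l : List Int) (p : String) :
    l.foldl (fun s i => s ++ g i) p = p ++ String.join (l.map g) := by
  induction l generalizing p with
  | nil => simp [String.join]
  | cons a t ih =>
      simp [ih, String.join, String.append_assoc]
      rw [foldl_app_str (List.map g t) (g a)]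

-- A's accumulating fold over the range equals prefix ++ joined mapped pieces.
theorem foldl_append_join (f : Int → String) (l : List Int) (p : String) :
    l.foldl (fun s i => s ++ "|X=" ++ f i) p = p ++ String.join (l.map (fun i => "|X=" ++ f i)) := by
  have h : (fun (s : String) (i : Int) => s ++ "|X=" ++ f i)
      = fun s i => s ++ ("|X=" ++ f i) := by
    funext s i; rw [String.append_assoc]
  rw [h, foldl_join]

-- the branch structure in A produces exactly the min..max range
theorem branch_eq (a b : Int) (p : String) (f : Int → String) :
    (if b < a then (PySem.List.pyRange b a 1).foldl (fun s i => s ++ "|X=" ++ f i) p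
     else if a < b then (PySem.List.pyRange a b 1).foldl (fun s i => s ++ "|X=" ++ f i) p
     else p)
    = p ++ String.join ((PySem.List.pyRange (min a b) (max a b) 1).map (fun i => "|X=" ++ f i)) := by
  rcases lt_trichotomy a b with h | h | h
  · rw [if_neg (by omega), if_pos h, foldl_append_join,
      min_eq_left h.le, max_eq_right h.le]
  · subst h
    rw [if_neg (by omega), if_neg (by omega)]
    simp [PySem.List.pyRange, String.join]
  · rw [if_pos h, foldl_append_join, min_eq_right h.le, max_eq_left h.le]

-- ===== VERDICT (by name: the statement is the Claim_ definition above) =====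
theorem polyEdge4_spec : Claim_equal_polyEdge4 := by
  intro g1 g2 _
  unfold Spec_polyEdge4 polyEdge4 polyEdge4_alt
  simp [branch_eq]
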